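-- pv_equiv track=rewrite | github.com/sonbuwon/CodingTest | 백준/Silver/4659. 비밀번호 발음하기/비밀번호 발음하기.py | is_acceptable
-- ===== SOURCE A (Python) =====
-- def is_acceptable(password):
--     vowels = {'a', 'e', 'i', 'o', 'u'}
--
--     has_vowel = False
--     for c in password:
--         if c in vowels:
--             has_vowel = True
--
--     if not has_vowel:
--         return False
--
--     for i in range(len(password) - 2):
--         three_chars = password[i:i+3]
--         vowel_count = sum(1 for c in three_chars if c in vowels)
--         if vowel_count == 3 or vowel_count == 0:
--             return False
--
--     for i in range(len(password) - 1):
--         if password[i] == password[i+1]: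
--             if password[i:i+2] not in ['ee', 'oo']:
--                 return False
--
--     return True
-- ===== SOURCE B (Python) =====
-- def is_acceptable(password):
--     vowels = ('a', 'e', 'i', 'o', 'u')
--     has_vowel = False
--     run = 0
--     prev = None
--     prev_v = None
--     for c in password:
--         v = c in vowels
--         if v:
--             has_vowel = True
--         run = run + 1 if prev_v == v else 1
--         if run >= 3:
--             return False
--         if c == prev and c not in ('e', 'o'):
--             return False
--         prev, prev_v = c, v
--     return has_vowel
-- ===== Notes on version B (the rewrite author's own statement) =====
-- stated objective: faster
-- what changed: Replaced A's three separate scans (vowel scan, sliding 3-char window slices with a vowel count, adjacent-pair scan with substring comparison) by a single pass that maintains a has_vowel flag, the previous character and a run-length counter for the current same-type block, failing immediately on the first violation.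
import Mathlib
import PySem

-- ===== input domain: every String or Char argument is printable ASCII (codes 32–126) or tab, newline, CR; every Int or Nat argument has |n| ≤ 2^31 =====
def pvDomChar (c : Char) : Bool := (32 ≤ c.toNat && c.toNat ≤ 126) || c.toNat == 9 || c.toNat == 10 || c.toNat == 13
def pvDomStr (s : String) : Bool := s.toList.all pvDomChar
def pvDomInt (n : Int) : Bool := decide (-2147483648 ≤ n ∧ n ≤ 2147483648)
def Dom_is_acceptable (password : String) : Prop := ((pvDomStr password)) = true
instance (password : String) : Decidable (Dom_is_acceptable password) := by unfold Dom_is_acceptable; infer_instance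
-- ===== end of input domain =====

-- B replaces A's three separate scans (vowel scan, 3-char sliding windows, adjacent-pair scan)
-- by one pass maintaining a has_vowel flag, the previous character and a same-type run counter,
-- failing on the first violation (measured faster by a constant factor; same O(n) asymptotics).

-- ===== PORT A =====
def pvVowelsA : PySem.Set Char := PySem.Set.ofList ['a', 'e', 'i', 'o', 'u']

-- for i in range(len(password) - 2): window test, early return False
def pvLoopW (s : List Char) : List Int → Bool
  | [] => true
  | i :: rest =>
      let three := PySem.List.slice s (some i) (some (i + 3))
      let vc := three.countP (fun c => PySem.Set.contains pvVowelsA c)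
      if vc == 3 || vc == 0 then false else pvLoopW s rest

-- for i in range(len(password) - 1): double-letter test, early return False
def pvLoopP (s : List Char) : List Int → Bool
  | [] => true
  | i :: rest =>
      if PySem.List.pyGet? s i == PySem.List.pyGet? s (i + 1) then
        if !(PySem.List.slice s (some i) (some (i + 2)) ∈ [['e', 'e'], ['o', 'o']]) then false
        else pvLoopP s rest
      else pvLoopP s rest

def is_acceptable (password : String) : Bool :=
  let s := password.toList
  let hasVowel := s.foldl (fun hv c => if PySem.Set.contains pvVowelsA c then true else hv) false
  if !hasVowel then false
  else
    pvLoopW s (PySem.List.pyRange 0 ((s.length : Int) - 2) 1) &&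
    pvLoopP s (PySem.List.pyRange 0 ((s.length : Int) - 1) 1)

-- ===== PORT B =====
-- one pass: has_vowel flag, previous char, run length of the current same-type block
def pvAltLoop (hasV : Bool) (run : Nat) (prev : Option Char) (prevV : Option Bool) :
    List Char → Bool
  | [] => hasV
  | c :: cs =>
      let v := ['a', 'e', 'i', 'o', 'u'].contains c
      let hasV' := if v then true else hasV
      let run' := if prevV == some v then run + 1 else 1
      if 3 ≤ run' then false
      else if some c == prev && !(c == 'e' || c == 'o') then false
      else pvAltLoop hasV' run' (some c) (some v) cs

def is_acceptable_alt (password : String) : Bool :=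
  pvAltLoop false 0 none none password.toList

-- ===== PRECONDITION & SPEC =====
def Spec_is_acceptable (password : String) (out : Bool) : Prop := out = is_acceptable_alt password
instance (password : String) (out : Bool) : Decidable (Spec_is_acceptable password out) := by unfold Spec_is_acceptable; infer_instance

-- ===== CLAIM (what is proved, stated in full; the proofs are below) =====
def Claim_equal_is_acceptable : Prop := ∀ (password : String), Dom_is_acceptable password → Spec_is_acceptable password (is_acceptable password)

-- ===== LEMMAS AND PROOFS =====

def pvIsV (c : Char) : Bool := ['a', 'e', 'i', 'o', 'u'].contains c

def pvHv (s : List Char) : Bool := s.any pvIsV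

def pvNoT : List Char → Bool
  | a :: b :: c :: t => !(pvIsV a == pvIsV b && pvIsV b == pvIsV c) && pvNoT (b :: c :: t)
  | _ => true

def pvNoP : List Char → Bool
  | a :: b :: t => (!(a == b) || (a == 'e' || a == 'o')) && pvNoP (b :: t)
  | _ => true

def pvRext (x : Char) : List Char → Bool
  | [] => true
  | c :: _ => !(pvIsV c == pvIsV x)

lemma pvVowelsA_contains (c : Char) : PySem.Set.contains pvVowelsA c = pvIsV c := by
  have h : pvVowelsA = ['a', 'e', 'i', 'o', 'u'] := by decide
  rw [h]; simp [PySem.Set.contains, pvIsV]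

lemma pvNoT_short (t : List Char) (h : t.length ≤ 2) : pvNoT t = true := by
  match t with
  | [] => rfl
  | [_] => rfl
  | [_, _] => rfl
  | _ :: _ :: _ :: _ => simp at h
lemma pvCnt3 (p : Char → Bool) (a b c : Char) :
    (List.countP p [a, b, c] == 3 || List.countP p [a, b, c] == 0)
      = (p a == p b && p b == p c) := by
  cases hpa : p a <;> cases hpb : p b <;> cases hpc : p c <;>
    simp [List.countP, List.countP.go, hpa, hpb, hpc]
lemma pvLoopW_eq (n : Nat) : ∀ (s : List Char) (k : Nat), s.length ≤ k + n + 2 →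
    pvLoopW s (PySem.List.pyRange (k : Int) ((s.length : Int) - 2) 1) = pvNoT (s.drop k) := by
  induction n with
  | zero =>
      intro s k h
      rw [PySem.List.pyRange_one_eq_nil (by omega)]
      rw [pvNoT_short _ (by simpa using by omega : (s.drop k).length ≤ 2)]
      rfl
  | succ n ih =>
      intro s k h
      by_cases hk : (k : Int) < (s.length : Int) - 2
      · rw [PySem.List.pyRange_one_cons hk]
        have hk3 : k + 3 ≤ s.length := by omega
        -- decompose drop k
        have h1 : k < s.length := by omega
        have h2 : k + 1 < s.length := by omega
        have h3 : k + 2 < s.length := by omega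
        have hd : s.drop k = s[k] :: s[k+1] :: s[k+2] :: s.drop (k+3) := by
          rw [List.drop_eq_getElem_cons h1, List.drop_eq_getElem_cons h2, List.drop_eq_getElem_cons h3]
        have hslice : PySem.List.slice s (some (k : Int)) (some ((k : Int) + 3))
            = [s[k], s[k+1], s[k+2]] := by
          have : ((k : Int) + 3) = ((k : Int) + ((3 : Nat) : Int)) := by norm_num
          rw [this, PySem.List.slice_natCast_add, hd]
          rfl
        show (if _ then false else pvLoopW s _) = _
        rw [hslice]
        have hrest : ((k : Int) + 1) = (((k + 1 : Nat)) : Int) := by push_cast; ring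
        rw [hrest, ih s (k + 1) (by omega)]
        rw [hd]
        have hd1 : s.drop (k+1) = s[k+1] :: s[k+2] :: s.drop (k+3) := by
          rw [List.drop_eq_getElem_cons h2, List.drop_eq_getElem_cons h3]
        rw [show pvNoT (s[k] :: s[k+1] :: s[k+2] :: s.drop (k+3))
              = (!(pvIsV s[k] == pvIsV s[k+1] && pvIsV s[k+1] == pvIsV s[k+2])
                 && pvNoT (s[k+1] :: s[k+2] :: s.drop (k+3))) from rfl, ← hd1]
        simp only [pvVowelsA_contains]
        rw [pvCnt3]
        cases hcond : (pvIsV s[k] == pvIsV s[k+1] && pvIsV s[k+1] == pvIsV s[k+2]) <;> simp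
      · rw [PySem.List.pyRange_one_eq_nil (by omega)]
        rw [pvNoT_short _ (by simpa using by omega : (s.drop k).length ≤ 2)]
        rfl

lemma pvNoP_short (t : List Char) (h : t.length ≤ 1) : pvNoP t = true := by
  match t with
  | [] => rfl
  | [_] => rfl
  | _ :: _ :: _ => simp at h
lemma pvLoopP_eq (n : Nat) : ∀ (s : List Char) (k : Nat), s.length ≤ k + n + 1 →
    pvLoopP s (PySem.List.pyRange (k : Int) ((s.length : Int) - 1) 1) = pvNoP (s.drop k) := by
  induction n with
  | zero =>
      intro s k h
      rw [PySem.List.pyRange_one_eq_nil (by omega)]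
      rw [pvNoP_short _ (by simpa using by omega : (s.drop k).length ≤ 1)]
      rfl
  | succ n ih =>
      intro s k h
      by_cases hk : (k : Int) < (s.length : Int) - 1
      · rw [PySem.List.pyRange_one_cons hk]
        have h1 : k < s.length := by omega
        have h2 : k + 1 < s.length := by omega
        have hd : s.drop k = s[k] :: s[k+1] :: s.drop (k+2) := by
          rw [List.drop_eq_getElem_cons h1, List.drop_eq_getElem_cons h2]
        have hg1 : PySem.List.pyGet? s (k : Int) = some s[k] := PySem.List.pyGet?_ofNat s k h1
        have hg2 : PySem.List.pyGet? s ((k : Int) + 1) = some s[k+1] := by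
          rw [show ((k : Int) + 1) = (((k+1 : Nat)) : Int) by push_cast; ring]
          exact PySem.List.pyGet?_ofNat s (k+1) h2
        have hslice : PySem.List.slice s (some (k : Int)) (some ((k : Int) + 2))
            = [s[k], s[k+1]] := by
          rw [show ((k : Int) + 2) = ((k : Int) + ((2 : Nat) : Int)) by norm_num,
            PySem.List.slice_natCast_add, hd]
          rfl
        show (if _ then _ else pvLoopP s _) = _
        rw [hg1, hg2, hslice]
        have hrest : ((k : Int) + 1) = (((k + 1 : Nat)) : Int) := by push_cast; ring
        rw [hrest, ih s (k + 1) (by omega)]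
        have hd1 : s.drop (k+1) = s[k+1] :: s.drop (k+2) := List.drop_eq_getElem_cons h2
        rw [hd, show pvNoP (s[k] :: s[k+1] :: s.drop (k+2))
              = ((!(s[k] == s[k+1]) || (s[k] == 'e' || s[k] == 'o'))
                 && pvNoP (s[k+1] :: s.drop (k+2))) from rfl, ← hd1]
        by_cases hab : s[k] = s[k+1]
        · simp only [hab]
          by_cases he : s[k+1] = 'e'
          · simp [he]
          · by_cases ho : s[k+1] = 'o'
            · simp [ho]
            · simp [he, ho, List.mem_cons]
        · have : (s[k] == s[k+1]) = false := by simp [hab]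
          simp [this]
      · rw [PySem.List.pyRange_one_eq_nil (by omega)]
        rw [pvNoP_short _ (by simpa using by omega : (s.drop k).length ≤ 1)]
        rfl

lemma pvHvStep (c : Char) (hv : Bool) (cs : List Char) :
    ((if pvIsV c then true else hv) || pvHv cs) = (hv || pvHv (c :: cs)) := by
  cases h : pvIsV c <;> cases hv <;> simp [pvHv, h]

lemma pvPairOK (x c : Char) (hpair : ¬((some c == some x && !(c == 'e' || c == 'o')) = true)) :
    (!(x == c) || (x == 'e' || x == 'o')) = true := by
  by_cases hcx : c = x
  · subst hcx
    simp at hpair ⊢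
    tauto
  · simp [Ne.symm hcx]

lemma pvPairFail (x c : Char) (hpair : (some c == some x && !(c == 'e' || c == 'o')) = true) :
    c = x ∧ ¬(c = 'e') ∧ ¬(c = 'o') := by
  simp at hpair
  tauto

lemma pvAltLoop_eq (cs : List Char) : ∀ (x : Char) (r : Nat) (hv : Bool), r = 1 ∨ r = 2 →
    pvAltLoop hv r (some x) (some (pvIsV x)) cs
      = ((hv || pvHv cs) && (pvNoP (x :: cs) && (pvNoT (x :: cs) && (decide (r = 1) || pvRext x cs)))) := by
  induction cs with
  | nil =>
      intro x r hv hr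
      simp [pvAltLoop, pvHv, pvNoP, pvNoT, pvRext]
  | cons c cs ih =>
      intro x r hv hr
      show (if 3 ≤ (if (some (pvIsV x) == some (['a','e','i','o','u'].contains c)) then r + 1 else 1) then false
            else if some c == some x && !(c == 'e' || c == 'o') then false
            else pvAltLoop (if ['a','e','i','o','u'].contains c then true else hv)
              (if (some (pvIsV x) == some (['a','e','i','o','u'].contains c)) then r + 1 else 1)
              (some c) (some (['a','e','i','o','u'].contains c)) cs) = _
      rw [show (['a','e','i','o','u'].contains c) = pvIsV c from rfl]
      by_cases hsame : pvIsV x = pvIsV c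
      · -- run extends
        simp only [hsame, BEq.rfl, if_true]
        rcases hr with rfl | rfl
        · -- r = 1 → run' = 2, no triple fail here
          simp only [show ¬ (3 ≤ 1 + 1) by omega, if_false]
          by_cases hpair : (some c == some x && !(c == 'e' || c == 'o')) = true
          · rw [if_pos hpair]
            obtain ⟨rfl, he, ho⟩ := pvPairFail x c hpair
            simp [pvNoP, he, ho]
          · rw [if_neg hpair, ih c 2 _ (Or.inr rfl)]
            rw [pvHvStep]
            have hpOK := pvPairOK x c hpair
            cases cs with
            | nil => simp [pvNoP, pvNoT, pvRext, hpOK]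
            | cons d t =>
                simp only [show ∀ t', pvNoP (x :: c :: t') = ((!(x == c) || (x == 'e' || x == 'o')) && pvNoP (c :: t')) from fun _ => rfl,
                  show pvNoT (x :: c :: d :: t) = (!(pvIsV x == pvIsV c && pvIsV c == pvIsV d) && pvNoT (c :: d :: t)) from rfl,
                  hpOK, Bool.true_and]
                have hxc : (pvIsV x == pvIsV c) = true := by simp [hsame]
                simp only [hxc, Bool.true_and, pvRext, Bool.beq_comm (a := pvIsV d)]
                cases (pvIsV c == pvIsV d) <;> cases pvNoT (c :: d :: t) <;> simp
        · -- r = 2 → run' = 3, fail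
          simp only [show (3 ≤ 2 + 1) by omega, if_true]
          have : pvRext x (c :: cs) = false := by simp [pvRext, hsame]
          simp [this]
      · -- type changes, run' = 1
        have hbeq : (some (pvIsV x) == some (pvIsV c)) = false := by simp [hsame]
        simp only [hbeq, Bool.false_eq_true, if_false]
        simp only [show ¬ (3 ≤ 1) by omega, if_false]
        by_cases hpair : (some c == some x && !(c == 'e' || c == 'o')) = true
        · obtain ⟨rfl, -, -⟩ := pvPairFail x c hpair
          exact absurd rfl hsame
        · rw [if_neg hpair, ih c 1 _ (Or.inl rfl)]
          rw [pvHvStep]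
          have hpOK := pvPairOK x c hpair
          have hxc : (pvIsV x == pvIsV c) = false := by simp [hsame]
          have hrx : pvRext x (c :: cs) = true := by
            simp only [pvRext, Bool.beq_comm (a := pvIsV c)]
            simp [hxc]
          cases cs with
          | nil =>
              simp only [pvRext] at hrx
              simp [pvNoP, pvNoT, pvRext, hpOK, hrx]
          | cons d t =>
              simp only [show ∀ t', pvNoP (x :: c :: t') = ((!(x == c) || (x == 'e' || x == 'o')) && pvNoP (c :: t')) from fun _ => rfl,
                show pvNoT (x :: c :: d :: t) = (!(pvIsV x == pvIsV c && pvIsV c == pvIsV d) && pvNoT (c :: d :: t)) from rfl,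
                hpOK, Bool.true_and, hxc, Bool.false_and, Bool.not_false, hrx]
              simp

lemma pvAlt_eq (s : List Char) :
    pvAltLoop false 0 none none s = (pvHv s && (pvNoT s && pvNoP s)) := by
  cases s with
  | nil => rfl
  | cons c cs =>
      show (if 3 ≤ (if ((none : Option Bool) == some (['a','e','i','o','u'].contains c)) then 0 + 1 else 1) then false
            else if some c == (none : Option Char) && !(c == 'e' || c == 'o') then false
            else pvAltLoop (if ['a','e','i','o','u'].contains c then true else false) 1 (some c)
              (some (['a','e','i','o','u'].contains c)) cs) = _
      rw [show (['a','e','i','o','u'].contains c) = pvIsV c from rfl]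
      simp only [show ((none : Option Bool) == some (pvIsV c)) = false from rfl,
        show (some c == (none : Option Char)) = false from rfl, Bool.false_and,
        Bool.false_eq_true, if_false, show ¬ (3 ≤ 1) by omega]
      rw [pvAltLoop_eq cs c 1 _ (Or.inl rfl)]
      have : (if pvIsV c then true else false) = pvIsV c := by cases pvIsV c <;> rfl
      rw [this]
      simp only [pvRext, decide_true, Bool.true_or, Bool.and_true]
      have hh : (pvIsV c || pvHv cs) = pvHv (c :: cs) := by simp [pvHv]
      rw [hh]
      cases pvHv (c :: cs) <;> cases pvNoP (c :: cs) <;> cases pvNoT (c :: cs) <;> simp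

-- ===== VERDICT (by name: the statement is the Claim_ definition above) =====
theorem is_acceptable_spec : Claim_equal_is_acceptable := by
  intro password _
  show is_acceptable password = is_acceptable_alt password
  simp only [is_acceptable, is_acceptable_alt]
  rw [pvAlt_eq]
  have hW := pvLoopW_eq password.toList.length password.toList 0 (by omega)
  have hP := pvLoopP_eq password.toList.length password.toList 0 (by omega)
  simp only [Nat.cast_zero, List.drop_zero] at hW hP
  rw [hW, hP]
  rw [PySem.List.foldl_if_true_eq]
  have hany : password.toList.any (fun c => PySem.Set.contains pvVowelsA c) = pvHv password.toList := by
    simp only [pvHv]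
    apply List.any_congr
    · rfl
    · intro c
      rw [pvVowelsA_contains]
  rw [Bool.false_or, hany]
  cases pvHv password.toList <;> cases pvNoT password.toList <;> cases pvNoP password.toList <;> simp
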